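-- pv_equiv track=rewrite | github.com/Ardalankt/classic-ml-algorithms | genetic algorithm(8 queen)/GA(8 queen).py | calculateFitnessOfChromosome
-- ===== SOURCE A (Python) =====
-- MaxFitness = 28
--
-- def calculateFitnessOfChromosome(boardInstance):
--     horizontalCollisions = 0
--     diagonalCollisions = 0
--     for i in range(8):
--         for j in range(i + 1, 8):
--             if boardInstance[i] == boardInstance[j]:
--                 horizontalCollisions += 1
--             elif abs(boardInstance[i] - boardInstance[j]) == j - i:
--                 diagonalCollisions += 1
--     fitnessOfChromosome = MaxFitness - (horizontalCollisions + diagonalCollisions)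
--     return fitnessOfChromosome
-- ===== SOURCE B (Python) =====
-- MaxFitness = 28
--
-- def calculateFitnessOfChromosome(boardInstance):
--     rows = {}
--     diag1 = {}
--     diag2 = {}
--     for i in range(8):
--         v = boardInstance[i]
--         rows[v] = rows.get(v, 0) + 1
--         diag1[v + i] = diag1.get(v + i, 0) + 1
--         diag2[v - i] = diag2.get(v - i, 0) + 1
--     collisions = 0
--     for table in (rows, diag1, diag2):
--         for c in table.values():
--             collisions += c * (c - 1) // 2
--     return MaxFitness - collisions
-- ===== Notes on version B (the rewrite author's own statement) =====
-- stated objective: alternative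
-- what changed: Replaces A's pairwise double loop over the 28 index pairs by a single pass that builds three frequency tables (row value, value+index, value-index) and sums c*(c-1)//2 over each table's counts.
import Mathlib
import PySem

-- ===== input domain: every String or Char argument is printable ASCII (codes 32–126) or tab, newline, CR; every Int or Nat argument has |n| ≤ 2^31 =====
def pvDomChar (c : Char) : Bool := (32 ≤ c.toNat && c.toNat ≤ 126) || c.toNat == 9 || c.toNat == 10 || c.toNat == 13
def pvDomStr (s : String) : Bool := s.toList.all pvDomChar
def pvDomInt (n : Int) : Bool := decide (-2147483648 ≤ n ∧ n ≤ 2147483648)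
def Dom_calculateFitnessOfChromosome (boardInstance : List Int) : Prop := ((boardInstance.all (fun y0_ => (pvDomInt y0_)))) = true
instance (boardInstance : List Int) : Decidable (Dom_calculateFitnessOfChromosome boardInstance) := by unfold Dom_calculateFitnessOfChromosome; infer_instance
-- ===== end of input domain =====

-- B replaces A's O(n²) pairwise double loop by one pass building three frequency tables
-- (rows and the two diagonal keys) and summing c*(c-1)//2 over each; same return value.

-- ===== PORT A =====
def calculateFitnessOfChromosome (boardInstance : List Int) : Int :=
  let st := (PySem.List.pyRange 0 8 1).foldl (fun (st : Int × Int) i =>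
      (PySem.List.pyRange (i + 1) 8 1).foldl (fun (st : Int × Int) j =>
        if PySem.List.pyGetD boardInstance i 0 = PySem.List.pyGetD boardInstance j 0 then
          (st.1 + 1, st.2)
        else if |PySem.List.pyGetD boardInstance i 0 - PySem.List.pyGetD boardInstance j 0| = j - i then
          (st.1, st.2 + 1)
        else st) st) (0, 0)
  28 - (st.1 + st.2)

-- ===== PORT B =====
def calculateFitnessOfChromosome_alt (boardInstance : List Int) : Int :=
  let tables := (PySem.List.pyRange 0 8 1).foldl
    (fun (st : PySem.Dict Int Int × PySem.Dict Int Int × PySem.Dict Int Int) i =>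
      (st.1.insert (PySem.List.pyGetD boardInstance i 0) (st.1.getD (PySem.List.pyGetD boardInstance i 0) 0 + 1),
       st.2.1.insert (PySem.List.pyGetD boardInstance i 0 + i) (st.2.1.getD (PySem.List.pyGetD boardInstance i 0 + i) 0 + 1),
       st.2.2.insert (PySem.List.pyGetD boardInstance i 0 - i) (st.2.2.getD (PySem.List.pyGetD boardInstance i 0 - i) 0 + 1)))
    (PySem.Dict.empty, PySem.Dict.empty, PySem.Dict.empty)
  let collisions := [tables.1, tables.2.1, tables.2.2].foldl
    (fun acc t => t.values.foldl (fun acc c => acc + PySem.Int.floordiv (c * (c - 1)) 2) acc) 0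
  28 - collisions

-- ===== PRECONDITION & SPEC =====
-- Pre_: Python A indexes boardInstance[0..7], so it raises IndexError on lists shorter than 8.
def Pre_calculateFitnessOfChromosome (boardInstance : List Int) : Prop := 8 ≤ boardInstance.length
instance (boardInstance : List Int) : Decidable (Pre_calculateFitnessOfChromosome boardInstance) := by unfold Pre_calculateFitnessOfChromosome; infer_instance
def pvWitness_calculateFitnessOfChromosome : List Int := [0, 4, 7, 5, 2, 6, 1, 3]

def Spec_calculateFitnessOfChromosome (boardInstance : List Int) (out : Int) : Prop := out = calculateFitnessOfChromosome_alt boardInstance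
instance (boardInstance : List Int) (out : Int) : Decidable (Spec_calculateFitnessOfChromosome boardInstance out) := by unfold Spec_calculateFitnessOfChromosome; infer_instance

-- ===== CLAIM (what is proved, stated in full; the proofs are below) =====
def Claim_equal_calculateFitnessOfChromosome : Prop := ∀ (boardInstance : List Int), Dom_calculateFitnessOfChromosome boardInstance → Pre_calculateFitnessOfChromosome boardInstance → Spec_calculateFitnessOfChromosome boardInstance (calculateFitnessOfChromosome boardInstance)

-- ===== LEMMAS AND PROOFS =====

-- how many elements of the list equal x, as an Int
def cntI (x : Int) : List Int → Int
  | [] => 0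
  | y :: t => (if y = x then (1:Int) else 0) + cntI x t

lemma cntI_eq_count (x : Int) (t : List Int) : cntI x t = (t.count x : Int) := by
  induction t with
  | nil => simp [cntI]
  | cons y t ih =>
    simp only [cntI, ih, List.count_cons]
    push_cast
    split_ifs with h1 h2 h2 <;> first | omega | simp_all

-- number of pairs i<j with ks[i] = ks[j] (pair-collision count of a key list)
def pairCnt : List Int → Int
  | [] => 0
  | x :: t => cntI x t + pairCnt t

-- c*(c-1)//2, the per-key number of colliding pairs
def pairsTerm (c : Int) : Int := PySem.Int.floordiv (c * (c - 1)) 2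

lemma pairsTerm_succ (c : Int) : pairsTerm (c + 1) = pairsTerm c + c := by
  unfold pairsTerm
  rw [PySem.Int.floordiv_eq_ediv_of_pos (by norm_num), PySem.Int.floordiv_eq_ediv_of_pos (by norm_num)]
  have h : (c + 1) * (c + 1 - 1) = c * (c - 1) + c * 2 := by ring
  rw [h, Int.add_mul_ediv_right _ _ (by norm_num)]

lemma finset_pairs (ks : List Int) :
    (∑ k ∈ ks.toFinset, pairsTerm ((ks.count k : Int))) = pairCnt ks := by
  induction ks with
  | nil => simp [pairCnt]
  | cons x t ih =>
    by_cases hx : x ∈ t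
    · have hts : (x :: t).toFinset = t.toFinset := by
        simp [List.toFinset_cons, hx]
      rw [hts, ← Finset.add_sum_erase _ _ (by simp [hx] : x ∈ t.toFinset)]
      rw [← Finset.add_sum_erase _ _ (by simp [hx] : x ∈ t.toFinset)] at ih
      have hc : ((x :: t).count x : Int) = (t.count x : Int) + 1 := by
        simp [List.count_cons_self]
      rw [hc, pairsTerm_succ]
      have herase : ∀ k ∈ t.toFinset.erase x,
          pairsTerm (((x :: t).count k : Int)) = pairsTerm ((t.count k : Int)) := by
        intro k hk
        have : k ≠ x := (Finset.mem_erase.mp hk).1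
        rw [List.count_cons_of_ne this.symm]
      rw [Finset.sum_congr rfl herase]
      simp [pairCnt, cntI_eq_count]
      omega
    · rw [List.toFinset_cons, Finset.sum_insert (by simpa using hx)]
      have hc1 : ((x :: t).count x : Int) = 1 := by
        simp [List.count_cons_self, List.count_eq_zero_of_not_mem hx]
      have hz : pairsTerm 1 = 0 := by decide
      have herase : ∀ k ∈ t.toFinset,
          pairsTerm (((x :: t).count k : Int)) = pairsTerm ((t.count k : Int)) := by
        intro k hk
        have : k ≠ x := by rintro rfl; exact hx (List.mem_toFinset.mp hk)
        rw [List.count_cons_of_ne this.symm]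
      rw [hc1, hz, Finset.sum_congr rfl herase, ih]
      simp [pairCnt, cntI_eq_count, List.count_eq_zero_of_not_mem hx]

lemma sum_counts_eq_pairCnt (ks : List Int) :
    (((PySem.Set.ofList ks).map (fun k => pairsTerm ((ks.count k : Int)))).sum) = pairCnt ks := by
  rw [← List.sum_toFinset _ (PySem.Set.nodup_ofList ks)]
  have h : (PySem.Set.ofList ks).toFinset = ks.toFinset := by
    ext k; simp [PySem.Set.mem_ofList]
  rw [h, finset_pairs]

lemma counter_fold_eq_pairCnt (ks : List Int) (a : Int) :
    ((PySem.Dict.counter ks).values.foldl (fun acc c => acc + PySem.Int.floordiv (c * (c - 1)) 2) a)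
      = a + pairCnt ks := by
  rw [PySem.List.foldl_add]
  have hv : (PySem.Dict.counter ks).values = (PySem.Set.ofList ks).map (fun k => ((ks.count k : Int))) := by
    simp only [PySem.Dict.values, PySem.Dict.items_counter, List.map_map]
    rfl
  rw [hv, List.map_map, ← sum_counts_eq_pairCnt ks]
  rfl

-- B's port equals 28 minus the pair-collision counts of the three key lists
lemma altEq (b : List Int) : calculateFitnessOfChromosome_alt b =
    28 - (pairCnt ((PySem.List.pyRange 0 8 1).map (fun i => PySem.List.pyGetD b i 0))
        + pairCnt ((PySem.List.pyRange 0 8 1).map (fun i => PySem.List.pyGetD b i 0 + i))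
        + pairCnt ((PySem.List.pyRange 0 8 1).map (fun i => PySem.List.pyGetD b i 0 - i))) := by
  unfold calculateFitnessOfChromosome_alt
  dsimp only
  rw [PySem.List.foldl_prod_mk
        (f := fun (d : PySem.Dict Int Int) i => d.insert (PySem.List.pyGetD b i 0) (d.getD (PySem.List.pyGetD b i 0) 0 + 1))
        (g := fun (p : PySem.Dict Int Int × PySem.Dict Int Int) i =>
          (p.1.insert (PySem.List.pyGetD b i 0 + i) (p.1.getD (PySem.List.pyGetD b i 0 + i) 0 + 1),
           p.2.insert (PySem.List.pyGetD b i 0 - i) (p.2.getD (PySem.List.pyGetD b i 0 - i) 0 + 1)))]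
  rw [PySem.List.foldl_prod_mk
        (f := fun (d : PySem.Dict Int Int) i => d.insert (PySem.List.pyGetD b i 0 + i) (d.getD (PySem.List.pyGetD b i 0 + i) 0 + 1))
        (g := fun (d : PySem.Dict Int Int) i => d.insert (PySem.List.pyGetD b i 0 - i) (d.getD (PySem.List.pyGetD b i 0 - i) 0 + 1))]
  rw [← List.foldl_map (f := fun i => PySem.List.pyGetD b i 0)
        (g := fun d v => PySem.Dict.insert d v (d.getD v 0 + 1)),
      ← List.foldl_map (f := fun i => PySem.List.pyGetD b i 0 + i)
        (g := fun d v => PySem.Dict.insert d v (d.getD v 0 + 1)),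
      ← List.foldl_map (f := fun i => PySem.List.pyGetD b i 0 - i)
        (g := fun d v => PySem.Dict.insert d v (d.getD v 0 + 1)),
      PySem.Dict.foldl_insert_getD_add_one_eq_counter,
      PySem.Dict.foldl_insert_getD_add_one_eq_counter,
      PySem.Dict.foldl_insert_getD_add_one_eq_counter]
  simp only [List.foldl]
  rw [counter_fold_eq_pairCnt, counter_fold_eq_pairCnt, counter_fold_eq_pairCnt]
  ring

-- A's if/elif step, rewritten as a pair of additive contributions
lemma stepA (b : List Int) (i : Int) : (fun (st : Int × Int) j =>
      if PySem.List.pyGetD b i 0 = PySem.List.pyGetD b j 0 then (st.1 + 1, st.2)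
      else if |PySem.List.pyGetD b i 0 - PySem.List.pyGetD b j 0| = j - i then (st.1, st.2 + 1)
      else st)
    = fun st j =>
      (st.1 + (if PySem.List.pyGetD b i 0 = PySem.List.pyGetD b j 0 then (1:Int) else 0),
       st.2 + (if PySem.List.pyGetD b i 0 = PySem.List.pyGetD b j 0 then (0:Int)
               else if |PySem.List.pyGetD b i 0 - PySem.List.pyGetD b j 0| = j - i then 1 else 0)) := by
  funext st j
  split_ifs <;> simp

-- one pair (i,j), i<j: A's if/elif contributions equal B's three table contributions
lemma perPair (x y i j : Int) (h : i < j) :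
    ((if x = y then (1:Int) else 0) + (if x = y then (0:Int) else if |x - y| = j - i then 1 else 0))
      = ((if y = x then (1:Int) else 0) + ((if y + j = x + i then (1:Int) else 0) + (if y - j = x - i then (1:Int) else 0))) := by
  rcases le_total x y with hle | hle
  · rw [abs_of_nonpos (by omega)]
    split_ifs <;> omega
  · rw [abs_of_nonneg (by omega)]
    split_ifs <;> omega

-- ===== VERDICT (by name: the statement is the Claim_ definition above) =====
set_option maxRecDepth 4000 in
theorem calculateFitnessOfChromosome_spec : Claim_equal_calculateFitnessOfChromosome := by
  intro boardInstance _ _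
  unfold Spec_calculateFitnessOfChromosome
  rw [altEq]
  unfold calculateFitnessOfChromosome
  dsimp only
  simp only [stepA,
      show PySem.List.pyRange 0 8 1 = [0, 1, 2, 3, 4, 5, 6, 7] from by decide,
      show PySem.List.pyRange (0 + 1) 8 1 = [1, 2, 3, 4, 5, 6, 7] from by decide,
      show PySem.List.pyRange (1 + 1) 8 1 = [2, 3, 4, 5, 6, 7] from by decide,
      show PySem.List.pyRange (2 + 1) 8 1 = [3, 4, 5, 6, 7] from by decide,
      show PySem.List.pyRange (3 + 1) 8 1 = [4, 5, 6, 7] from by decide,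
      show PySem.List.pyRange (4 + 1) 8 1 = [5, 6, 7] from by decide,
      show PySem.List.pyRange (5 + 1) 8 1 = [6, 7] from by decide,
      show PySem.List.pyRange (6 + 1) 8 1 = [7] from by decide,
      show PySem.List.pyRange (7 + 1) 8 1 = [] from by decide,
      List.foldl, List.map]
  simp only [pairCnt, cntI]
  have e01 := perPair (PySem.List.pyGetD boardInstance 0 0) (PySem.List.pyGetD boardInstance 1 0) 0 1 (by norm_num)
  have e02 := perPair (PySem.List.pyGetD boardInstance 0 0) (PySem.List.pyGetD boardInstance 2 0) 0 2 (by norm_num)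
  have e03 := perPair (PySem.List.pyGetD boardInstance 0 0) (PySem.List.pyGetD boardInstance 3 0) 0 3 (by norm_num)
  have e04 := perPair (PySem.List.pyGetD boardInstance 0 0) (PySem.List.pyGetD boardInstance 4 0) 0 4 (by norm_num)
  have e05 := perPair (PySem.List.pyGetD boardInstance 0 0) (PySem.List.pyGetD boardInstance 5 0) 0 5 (by norm_num)
  have e06 := perPair (PySem.List.pyGetD boardInstance 0 0) (PySem.List.pyGetD boardInstance 6 0) 0 6 (by norm_num)
  have e07 := perPair (PySem.List.pyGetD boardInstance 0 0) (PySem.List.pyGetD boardInstance 7 0) 0 7 (by norm_num)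
  have e12 := perPair (PySem.List.pyGetD boardInstance 1 0) (PySem.List.pyGetD boardInstance 2 0) 1 2 (by norm_num)
  have e13 := perPair (PySem.List.pyGetD boardInstance 1 0) (PySem.List.pyGetD boardInstance 3 0) 1 3 (by norm_num)
  have e14 := perPair (PySem.List.pyGetD boardInstance 1 0) (PySem.List.pyGetD boardInstance 4 0) 1 4 (by norm_num)
  have e15 := perPair (PySem.List.pyGetD boardInstance 1 0) (PySem.List.pyGetD boardInstance 5 0) 1 5 (by norm_num)
  have e16 := perPair (PySem.List.pyGetD boardInstance 1 0) (PySem.List.pyGetD boardInstance 6 0) 1 6 (by norm_num)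
  have e17 := perPair (PySem.List.pyGetD boardInstance 1 0) (PySem.List.pyGetD boardInstance 7 0) 1 7 (by norm_num)
  have e23 := perPair (PySem.List.pyGetD boardInstance 2 0) (PySem.List.pyGetD boardInstance 3 0) 2 3 (by norm_num)
  have e24 := perPair (PySem.List.pyGetD boardInstance 2 0) (PySem.List.pyGetD boardInstance 4 0) 2 4 (by norm_num)
  have e25 := perPair (PySem.List.pyGetD boardInstance 2 0) (PySem.List.pyGetD boardInstance 5 0) 2 5 (by norm_num)
  have e26 := perPair (PySem.List.pyGetD boardInstance 2 0) (PySem.List.pyGetD boardInstance 6 0) 2 6 (by norm_num)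
  have e27 := perPair (PySem.List.pyGetD boardInstance 2 0) (PySem.List.pyGetD boardInstance 7 0) 2 7 (by norm_num)
  have e34 := perPair (PySem.List.pyGetD boardInstance 3 0) (PySem.List.pyGetD boardInstance 4 0) 3 4 (by norm_num)
  have e35 := perPair (PySem.List.pyGetD boardInstance 3 0) (PySem.List.pyGetD boardInstance 5 0) 3 5 (by norm_num)
  have e36 := perPair (PySem.List.pyGetD boardInstance 3 0) (PySem.List.pyGetD boardInstance 6 0) 3 6 (by norm_num)
  have e37 := perPair (PySem.List.pyGetD boardInstance 3 0) (PySem.List.pyGetD boardInstance 7 0) 3 7 (by norm_num)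
  have e45 := perPair (PySem.List.pyGetD boardInstance 4 0) (PySem.List.pyGetD boardInstance 5 0) 4 5 (by norm_num)
  have e46 := perPair (PySem.List.pyGetD boardInstance 4 0) (PySem.List.pyGetD boardInstance 6 0) 4 6 (by norm_num)
  have e47 := perPair (PySem.List.pyGetD boardInstance 4 0) (PySem.List.pyGetD boardInstance 7 0) 4 7 (by norm_num)
  have e56 := perPair (PySem.List.pyGetD boardInstance 5 0) (PySem.List.pyGetD boardInstance 6 0) 5 6 (by norm_num)
  have e57 := perPair (PySem.List.pyGetD boardInstance 5 0) (PySem.List.pyGetD boardInstance 7 0) 5 7 (by norm_num)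
  have e67 := perPair (PySem.List.pyGetD boardInstance 6 0) (PySem.List.pyGetD boardInstance 7 0) 6 7 (by norm_num)
  norm_num at e01 e02 e03 e04 e05 e06 e07 e12 e13 e14 e15 e16 e17 e23 e24 e25 e26 e27 e34 e35 e36 e37 e45 e46 e47 e56 e57 e67 ⊢
  linear_combination e01 + e02 + e03 + e04 + e05 + e06 + e07 + e12 + e13 + e14 + e15 + e16 + e17 + e23 + e24 + e25 + e26 + e27 + e34 + e35 + e36 + e37 + e45 + e46 + e47 + e56 + e57 + e67
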